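-- pv_equiv track=rewrite | github.com/mrahtz/ultra_ping | analysis/graph_common.py | find_out_of_order_packet_indices
-- ===== SOURCE A (Python) =====
-- def find_out_of_order_packet_indices(packet_ns):
--     """
--     Return indices of packets which have apparently arrived out-of-order.
--     Specifically: return indices of any packet number which was less than the
--     previous packet number. For example, for the list of packet numbers:
--         0, 1, 2, 3, 5, 4, 6, 7.
--     return index 5 (corresponding to '4').
--     """
--     indices = []
--     prev_packet_n = packet_ns[0] - 1
--     for i in range(len(packet_ns)):
--         packet_n = packet_ns[i]
--         if packet_n > prev_packet_n:
--             # say, if the previous packet was 2, and now we're at 3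
--             # or if the previous packet was 3, and now we're at 5
--             prev_packet_n = packet_n
--         elif packet_n < prev_packet_n:
--             # e.g. if the previous packet was 5, and we're now at 4
--             # (having given up all hope of seeing 4 again when we saw 5)
--             indices.append(i)
--     return indices
-- ===== SOURCE B (Python) =====
-- def find_out_of_order_packet_indices(packet_ns):
--     """
--     Return indices of packets which have apparently arrived out-of-order
--     (i.e. indices i whose packet number is below the running maximum of
--     all earlier packet numbers).  Two passes: build the prefix-maximum
--     list, then collect the offending indices with a comprehension.
--     """
--     prefix_max = []
--     m = None
--     for x in packet_ns:
--         if m is None or x > m: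
--             m = x
--         prefix_max.append(m)
--     return [i for i in range(1, len(packet_ns))
--             if packet_ns[i] < prefix_max[i - 1]]
-- ===== Notes on version B (the rewrite author's own statement) =====
-- stated objective: alternative
-- what changed: A keeps a running 'previous maximum' in one stateful loop that conditionally appends indices; B first materialises the prefix-maximum list in one pass and then selects offending indices with a separate index comprehension.
import Mathlib
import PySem

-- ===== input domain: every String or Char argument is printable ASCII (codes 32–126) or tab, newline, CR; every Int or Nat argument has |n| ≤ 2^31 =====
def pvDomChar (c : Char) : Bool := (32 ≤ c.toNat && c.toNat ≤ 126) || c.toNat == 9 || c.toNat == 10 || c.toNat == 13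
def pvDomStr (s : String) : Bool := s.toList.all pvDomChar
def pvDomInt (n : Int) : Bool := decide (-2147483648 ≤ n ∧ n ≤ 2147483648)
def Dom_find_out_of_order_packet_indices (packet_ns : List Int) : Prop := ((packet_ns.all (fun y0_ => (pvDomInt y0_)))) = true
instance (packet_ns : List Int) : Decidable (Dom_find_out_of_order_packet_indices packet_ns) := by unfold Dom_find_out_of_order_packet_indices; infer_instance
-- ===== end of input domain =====

-- B rebuilds the result from a materialised prefix-maximum list (two passes)
-- instead of A's single stateful loop; same O(n) cost, different decomposition.

-- ===== PORT A =====
-- the body of A's `for i in range(len(packet_ns))` loop; state = (indices, prev_packet_n)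
def pvLoopA (packet_ns : List Int) (s : List Int × Int) (i : Int) : List Int × Int :=
  let packet_n := PySem.List.pyGetD packet_ns i 0
  if packet_n > s.2 then (s.1, packet_n)
  else if packet_n < s.2 then (s.1 ++ [i], s.2)
  else s

def find_out_of_order_packet_indices (packet_ns : List Int) : List Int :=
  ((PySem.List.pyRange 0 packet_ns.length 1).foldl (pvLoopA packet_ns)
    ([], PySem.List.pyGetD packet_ns 0 0 - 1)).1

-- ===== PORT B =====
-- the body of B's `for x in packet_ns` loop; state = (prefix_max, m) with m = none for Python's None
def pvStepB (s : List Int × Option Int) (x : Int) : List Int × Option Int :=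
  let m : Int := match s.2 with
    | none => x
    | some m => if x > m then x else m
  (s.1 ++ [m], some m)

def pvPrefixMax (packet_ns : List Int) : List Int :=
  (packet_ns.foldl pvStepB ([], none)).1

def find_out_of_order_packet_indices_alt (packet_ns : List Int) : List Int :=
  let prefix_max := pvPrefixMax packet_ns
  (PySem.List.pyRange 1 packet_ns.length 1).filter
    (fun i => decide (PySem.List.pyGetD packet_ns i 0 < PySem.List.pyGetD prefix_max (i - 1) 0))

-- ===== PRECONDITION & SPEC =====
-- Pre_ excludes exactly the empty list, on which A raises IndexError (packet_ns[0]).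
def Pre_find_out_of_order_packet_indices (packet_ns : List Int) : Prop := packet_ns ≠ []
instance (packet_ns : List Int) : Decidable (Pre_find_out_of_order_packet_indices packet_ns) := by
  unfold Pre_find_out_of_order_packet_indices; infer_instance

def pvWitness_find_out_of_order_packet_indices : List Int := [0, 1, 2, 3, 5, 4, 6, 7]

def Spec_find_out_of_order_packet_indices (packet_ns : List Int) (out : List Int) : Prop :=
  out = find_out_of_order_packet_indices_alt packet_ns
instance (packet_ns : List Int) (out : List Int) : Decidable (Spec_find_out_of_order_packet_indices packet_ns out) := by
  unfold Spec_find_out_of_order_packet_indices; infer_instance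

-- ===== CLAIM (what is proved, stated in full; the proofs are below) =====
def Claim_equal_find_out_of_order_packet_indices : Prop :=
  ∀ (packet_ns : List Int), Dom_find_out_of_order_packet_indices packet_ns →
    Pre_find_out_of_order_packet_indices packet_ns →
    Spec_find_out_of_order_packet_indices packet_ns (find_out_of_order_packet_indices packet_ns)

-- ===== LEMMAS AND PROOFS =====

-- the running maximum A's `prev_packet_n` holds after the whole loop (for nonempty input)
def pvMax (l : List Int) : Int := l.foldl max (l.getD 0 0 - 1)

theorem pyGetD_append_left (xs ys : List Int) (i : Int) (d : Int)
    (h0 : 0 ≤ i) (h1 : i < xs.length) :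
    PySem.List.pyGetD (xs ++ ys) i d = PySem.List.pyGetD xs i d := by
  rw [PySem.List.pyGetD_eq_getElem (xs ++ ys) d h0 (by simp; omega),
      PySem.List.pyGetD_eq_getElem xs d h0 h1]
  exact List.getElem_append_left (by omega)

theorem pvInv (xs : List Int) (hne : xs ≠ []) :
    (xs.foldl pvStepB ([], none)).2 = some (pvMax xs) ∧
    (pvPrefixMax xs).length = xs.length ∧
    (pvPrefixMax xs).getLast? = some (pvMax xs) ∧
    ((PySem.List.pyRange 0 xs.length 1).foldl (pvLoopA xs)
      ([], PySem.List.pyGetD xs 0 0 - 1)).2 = pvMax xs ∧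
    find_out_of_order_packet_indices xs = find_out_of_order_packet_indices_alt xs := by
  induction xs using List.reverseRecOn with
  | nil => exact absurd rfl hne
  | append_singleton xs x ih =>
    by_cases hxs : xs = []
    · subst hxs
      refine ⟨?_, ?_, ?_, ?_, ?_⟩ <;>
        simp [pvStepB, pvPrefixMax, pvMax, find_out_of_order_packet_indices,
          find_out_of_order_packet_indices_alt, pvLoopA, PySem.List.pyRange_one]
    · obtain ⟨ihB2, ihLen, ihLast, ihA2, ihEq⟩ := ih hxs
      have hn1 : 1 ≤ xs.length := List.length_pos_iff.mpr hxs
      set n := xs.length with hn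
      set M := pvMax xs with hM
      -- head element unchanged by the append
      have hhead : PySem.List.pyGetD (xs ++ [x]) 0 0 = PySem.List.pyGetD xs 0 0 :=
        pyGetD_append_left xs [x] 0 0 le_rfl (by exact_mod_cast hn1)
      -- the appended element, read back by index n
      have hlastget : PySem.List.pyGetD (xs ++ [x]) (n : Int) 0 = x := by
        rw [PySem.List.pyGetD_natCast]
        simp [List.getD, hn]
      -- (F1) running max of xs ++ [x]
      have hmax : pvMax (xs ++ [x]) = max M x := by
        unfold pvMax
        rw [List.foldl_append]
        have : (xs ++ [x]).getD 0 0 = xs.getD 0 0 := by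
          rcases xs with _ | ⟨y, ys⟩
          · exact absurd rfl hxs
          · rfl
        rw [this]
        rfl
      -- (F2) B's fold state on xs ++ [x]
      have hBfold : (xs ++ [x]).foldl pvStepB ([], none) =
          (pvPrefixMax xs ++ [max M x], some (max M x)) := by
        rw [List.foldl_append]
        have hsplit : xs.foldl pvStepB ([], none) = (pvPrefixMax xs, some M) := by
          have : xs.foldl pvStepB ([], none) =
              ((xs.foldl pvStepB ([], none)).1, (xs.foldl pvStepB ([], none)).2) := rfl
          rw [this, ihB2]; rfl
        rw [hsplit]
        simp only [pvStepB, List.foldl_cons, List.foldl_nil]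
        have : (if x > M then x else M) = max M x := by
          rcases lt_or_ge M x with h | h
          · rw [if_pos h, max_eq_right h.le]
          · rw [if_neg (not_lt.mpr h), max_eq_left h]
        simp [this]
      have hpm : pvPrefixMax (xs ++ [x]) = pvPrefixMax xs ++ [max M x] := by
        unfold pvPrefixMax
        rw [hBfold]
        rfl
      -- (F3) A's fold on xs ++ [x]
      have hlen : (((xs ++ [x]).length : Int)) = (n : Int) + 1 := by
        simp [hn]
      have hrangeA : PySem.List.pyRange 0 ((xs ++ [x]).length : Int) 1 =
          PySem.List.pyRange 0 (n : Int) 1 ++ [(n : Int)] := by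
        rw [hlen, PySem.List.pyRange_one_succ_right (by positivity)]
      have hcongrA : (PySem.List.pyRange 0 (n : Int) 1).foldl (pvLoopA (xs ++ [x]))
            ([], PySem.List.pyGetD xs 0 0 - 1) =
          (PySem.List.pyRange 0 (n : Int) 1).foldl (pvLoopA xs)
            ([], PySem.List.pyGetD xs 0 0 - 1) := by
        apply PySem.List.foldl_congr_mem
        intro acc i hi
        rw [PySem.List.mem_pyRange_one] at hi
        unfold pvLoopA
        rw [pyGetD_append_left xs [x] i 0 hi.1 hi.2]
      have hAfold : (PySem.List.pyRange 0 ((xs ++ [x]).length : Int) 1).foldl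
            (pvLoopA (xs ++ [x])) ([], PySem.List.pyGetD (xs ++ [x]) 0 0 - 1) =
          (find_out_of_order_packet_indices xs ++ (if x < M then [(n : Int)] else []),
           max M x) := by
        rw [hrangeA, List.foldl_append, hhead, hcongrA]
        have hq : (PySem.List.pyRange 0 (n : Int) 1).foldl (pvLoopA xs)
              ([], PySem.List.pyGetD xs 0 0 - 1) =
            (find_out_of_order_packet_indices xs, M) := by
          have heta : (PySem.List.pyRange 0 (n : Int) 1).foldl (pvLoopA xs)
                ([], PySem.List.pyGetD xs 0 0 - 1) =
              (((PySem.List.pyRange 0 (n : Int) 1).foldl (pvLoopA xs)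
                ([], PySem.List.pyGetD xs 0 0 - 1)).1,
               ((PySem.List.pyRange 0 (n : Int) 1).foldl (pvLoopA xs)
                ([], PySem.List.pyGetD xs 0 0 - 1)).2) := rfl
          rw [heta, ihA2]
          rfl
        rw [hq]
        simp only [List.foldl_cons, List.foldl_nil]
        unfold pvLoopA
        rw [hlastget]
        rcases lt_trichotomy x M with h | h | h
        · rw [if_neg (by omega), if_pos h, if_pos h, max_eq_left h.le]
        · subst h
          rw [if_neg (by omega), if_neg (by omega), if_neg (by omega), max_self]
          simp
        · rw [if_pos h, if_neg (by omega), max_eq_right h.le]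
          simp
      -- (F4) B's result on xs ++ [x]
      have hrangeB : PySem.List.pyRange 1 ((xs ++ [x]).length : Int) 1 =
          PySem.List.pyRange 1 (n : Int) 1 ++ [(n : Int)] := by
        rw [hlen, PySem.List.pyRange_one_succ_right (by exact_mod_cast hn1)]
      have hpmlast : PySem.List.pyGetD (pvPrefixMax xs) ((n : Int) - 1) 0 = M := by
        rw [PySem.List.pyGetD_eq_getElem (pvPrefixMax xs) 0 (by omega)
              (by rw [ihLen]; omega)]
        have h2 : (pvPrefixMax xs)[n - 1]? = some M := by
          have := ihLast
          rw [List.getLast?_eq_getElem?, ihLen] at this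
          exact this
        have h3 : ((n : Int) - 1).toNat = n - 1 := by omega
        have hidx : ((n : Int) - 1).toNat < (pvPrefixMax xs).length := by
          rw [ihLen]; omega
        have h4 : (pvPrefixMax xs)[((n : Int) - 1).toNat]? = some M := by
          rw [h3]; exact h2
        rw [List.getElem?_eq_getElem hidx] at h4
        exact Option.some_injective _ h4
      have hBalt : find_out_of_order_packet_indices_alt (xs ++ [x]) =
          find_out_of_order_packet_indices_alt xs ++ (if x < M then [(n : Int)] else []) := by
        unfold find_out_of_order_packet_indices_alt
        rw [hpm, hrangeB, List.filter_append]
        congr 1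
        · apply List.filter_congr
          intro i hi
          rw [PySem.List.mem_pyRange_one] at hi
          rw [pyGetD_append_left xs [x] i 0 (by omega) hi.2,
              pyGetD_append_left (pvPrefixMax xs) [max M x] (i - 1) 0 (by omega)
                (by rw [ihLen]; omega)]
        · simp only [List.filter_cons, List.filter_nil]
          rw [hlastget,
              pyGetD_append_left (pvPrefixMax xs) [max M x] ((n : Int) - 1) 0 (by omega)
                (by rw [ihLen]; exact_mod_cast (by omega : (n : Int) - 1 < (n : Int))),
              hpmlast]
          by_cases h : x < M
          · simp [h]
          · simp [h]
      refine ⟨?_, ?_, ?_, ?_, ?_⟩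
      · rw [hBfold, hmax]
      · rw [hpm]; simp [ihLen]; exact hn
      · rw [hpm, hmax]; simp
      · rw [hAfold, hmax]
      · show ((PySem.List.pyRange 0 ((xs ++ [x]).length : Int) 1).foldl
            (pvLoopA (xs ++ [x])) ([], PySem.List.pyGetD (xs ++ [x]) 0 0 - 1)).1 = _
        rw [hAfold, hBalt, ihEq]

-- ===== VERDICT (by name: the statement is the Claim_ definition above) =====
theorem find_out_of_order_packet_indices_spec : Claim_equal_find_out_of_order_packet_indices := by
  intro l _ hpre
  exact (pvInv l hpre).2.2.2.2
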